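-- pv_equiv track=rewrite | github.com/0Desom0/Desom-OlivaDice-Plugin | 娱乐/TexasHoldem/function.py | _split_compact_ranks
-- ===== SOURCE A (Python) =====
-- from typing import Dict, List, Optional, Tuple
--
-- def _split_compact_ranks(compact: str) -> List[str]:
--     """把紧凑点数串拆成点数 token 列表（支持 10）。"""
--     s = str(compact or '')
--     out: List[str] = []
--     i = 0
--     while i < len(s):
--         if s.startswith('10', i):
--             out.append('10')
--             i += 2
--         else:
--             out.append(s[i])
--             i += 1
--     return out
-- ===== SOURCE B (Python) =====
-- from typing import List
--
-- def _split_compact_ranks(compact: str) -> List[str]: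
--     """把紧凑点数串拆成点数 token 列表（支持 10）。"""
--     s = str(compact or '')
--     parts = s.split('10')
--     out: List[str] = []
--     for j, p in enumerate(parts):
--         if j:
--             out.append('10')
--         out.extend(p)
--     return out
-- ===== Notes on version B (the rewrite author's own statement) =====
-- stated objective: idiomatic
-- what changed: Replaces the manual index/while-loop tokenizer (a startswith probe at each position) with one str.split on the two-char separator followed by interleaving the parts' characters with separator tokens.
import Mathlib
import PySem

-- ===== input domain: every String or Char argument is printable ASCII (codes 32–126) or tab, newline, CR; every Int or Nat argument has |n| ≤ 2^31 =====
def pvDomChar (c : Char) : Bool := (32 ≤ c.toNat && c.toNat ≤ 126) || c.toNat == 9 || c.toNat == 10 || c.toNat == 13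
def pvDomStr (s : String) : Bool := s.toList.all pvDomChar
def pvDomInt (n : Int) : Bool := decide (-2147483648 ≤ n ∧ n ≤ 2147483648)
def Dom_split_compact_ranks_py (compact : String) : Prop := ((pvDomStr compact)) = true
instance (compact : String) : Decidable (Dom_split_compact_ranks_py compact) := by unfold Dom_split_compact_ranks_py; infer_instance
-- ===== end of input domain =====

-- B replaces A's index-driven while-loop tokenizer with split-on-'10' plus interleaving (idiomatic, same cost).


-- ===== PORT A =====
-- A's while-loop over index i: if s.startswith('10', i) consume two chars, else one char.
def pvGoA : List Char → List String
  | '1' :: '0' :: rest => "10" :: pvGoA rest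
  | c :: rest => String.ofList [c] :: pvGoA rest
  | [] => []

def split_compact_ranks_py (compact : String) : List String :=
  -- str(compact or '') is the identity on a Python str argument ('' stays '')
  pvGoA compact.toList

-- ===== PORT B =====
-- B: parts = s.split('10') (Python semantics for a nonempty separator: leftmost
-- non-overlapping occurrences), then the parts' characters interleaved with '10' tokens.
def pvSplit10 : List Char → List (List Char)
  | '1' :: '0' :: rest => [] :: pvSplit10 rest
  | c :: rest =>
      match pvSplit10 rest with
      | p :: ps => (c :: p) :: ps
      | [] => [[c]]
  | [] => [[]]

def pvGlue : List (List Char) → List String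
  | [] => []
  | [p] => p.map (fun c => String.ofList [c])
  | p :: ps => p.map (fun c => String.ofList [c]) ++ "10" :: pvGlue ps

def split_compact_ranks_py_alt (compact : String) : List String :=
  pvGlue (pvSplit10 compact.toList)

-- ===== PRECONDITION & SPEC =====
def Spec_split_compact_ranks_py (compact : String) (out : List String) : Prop := out = split_compact_ranks_py_alt compact
instance (compact : String) (out : List String) : Decidable (Spec_split_compact_ranks_py compact out) := by unfold Spec_split_compact_ranks_py; infer_instance

-- ===== CLAIM (what is proved, stated in full; the proofs are below) =====
def Claim_equal_split_compact_ranks_py : Prop := ∀ (compact : String), Dom_split_compact_ranks_py compact → Spec_split_compact_ranks_py compact (split_compact_ranks_py compact)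

-- ===== LEMMAS AND PROOFS =====
theorem pvGlue_cons (c : Char) (p : List Char) (ps : List (List Char)) :
    pvGlue ((c :: p) :: ps) = String.ofList [c] :: pvGlue (p :: ps) := by
  cases ps <;> simp [pvGlue]

theorem pvSplit10_ne_nil (l : List Char) : pvSplit10 l ≠ [] := by
  fun_induction pvSplit10 l <;> simp

theorem pvGoA_eq (l : List Char) : pvGoA l = pvGlue (pvSplit10 l) := by
  fun_induction pvGoA l with
  | case1 rest ih =>
      cases hr : pvSplit10 rest with
      | nil => exact absurd hr (pvSplit10_ne_nil rest)
      | cons p ps =>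
          rw [ih, show pvSplit10 ('1'::'0'::rest) = [] :: pvSplit10 rest from rfl, hr]
          cases ps <;> simp [pvGlue]
  | case2 c rest h ih =>
      have hs : pvSplit10 (c :: rest) =
          match pvSplit10 rest with
          | p :: ps => (c :: p) :: ps
          | [] => [[c]] := by
        rw [pvSplit10.eq_def]
        split
        · next r heq =>
            injection heq with h1 h2; exact (h r h1 h2).elim
        · next c' rest' heq =>
            injection heq with h1 h2; subst h1; subst h2; rfl
        · next heq => cases heq
      cases hr : pvSplit10 rest with
      | nil => exact absurd hr (pvSplit10_ne_nil rest)
      | cons p ps =>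
          rw [ih, hs, hr, pvGlue_cons]
  | case3 => rfl

-- ===== VERDICT (by name: the statement is the Claim_ definition above) =====
theorem split_compact_ranks_py_spec : Claim_equal_split_compact_ranks_py := by
  intro compact _
  unfold Spec_split_compact_ranks_py split_compact_ranks_py split_compact_ranks_py_alt
  exact pvGoA_eq compact.toList
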